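-- pv_equiv track=rewrite | github.com/stuffbucket/skills | plugins/stuffbucket/skills/figma-make-to-vite/scripts/fix_figma_type_errors.py | fix_orphan_ref
-- ===== SOURCE A (Python) =====
-- def fix_orphan_ref(content: str, varname: str, error_line: int) -> tuple[str, int]:
--     """
--     Declare a missing useRef variable that a component reads via .current.
--
--     Strategy: find the last useRef() call before the error line and insert the
--     new declaration immediately after it, matching its indentation. Falls back
--     to the last useState/useContext call if no useRef is present.
--
--     The declared type is ReturnType<typeof setTimeout> | null, which covers the
--     most common Figma Make pattern (debounced saves, animation timers).
--     """
--     lines = content.splitlines(keepends=True)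
--     limit = min(error_line - 1, len(lines))
--
--     insert_after = -1
--     for i in range(limit - 1, -1, -1):
--         if "useRef(" in lines[i]:
--             insert_after = i
--             break
--
--     if insert_after == -1:
--         for i in range(limit - 1, -1, -1):
--             if "useState(" in lines[i] or "useContext(" in lines[i]:
--                 insert_after = i
--                 break
--
--     if insert_after == -1:
--         return content, 0
--
--     ref_line = lines[insert_after]
--     indent = len(ref_line) - len(ref_line.lstrip())
--     indent_str = ref_line[:indent]
--
--     new_line = (
--         f"{indent_str}const {varname} = "
--         f"useRef<ReturnType<typeof setTimeout> | null>(null);\n"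
--     )
--     lines.insert(insert_after + 1, new_line)
--     return "".join(lines), 1
-- ===== SOURCE B (Python) =====
-- def fix_orphan_ref(content: str, varname: str, error_line: int) -> tuple[str, int]:
--     """Single forward pass tracking the last useRef / fallback line, then
--     rebuild the output by string concatenation instead of list insertion."""
--     lines = content.splitlines(keepends=True)
--     limit = min(error_line - 1, len(lines))
--
--     last_ref = -1
--     last_fallback = -1
--     for i in range(limit):
--         line = lines[i]
--         if "useRef(" in line:
--             last_ref = i
--         if "useState(" in line or "useContext(" in line:
--             last_fallback = i
--
--     insert_after = last_ref if last_ref != -1 else last_fallback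
--     if insert_after == -1:
--         return content, 0
--
--     ref_line = lines[insert_after]
--     indent_str = ref_line[:len(ref_line) - len(ref_line.lstrip())]
--     new_line = (
--         f"{indent_str}const {varname} = "
--         f"useRef<ReturnType<typeof setTimeout> | null>(null);\n"
--     )
--     head = "".join(lines[:insert_after + 1])
--     tail = "".join(lines[insert_after + 1:])
--     return head + new_line + tail, 1
-- ===== Notes on version B (the rewrite author's own statement) =====
-- stated objective: alternative
-- what changed: Replaces A's two backward short-circuit scans over range(limit-1,-1,-1) with one forward pass that accumulates the last useRef index and the last useState/useContext index, and rebuilds the result by string concatenation of head + new line + tail instead of list.insert followed by a full join.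
import Mathlib
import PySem

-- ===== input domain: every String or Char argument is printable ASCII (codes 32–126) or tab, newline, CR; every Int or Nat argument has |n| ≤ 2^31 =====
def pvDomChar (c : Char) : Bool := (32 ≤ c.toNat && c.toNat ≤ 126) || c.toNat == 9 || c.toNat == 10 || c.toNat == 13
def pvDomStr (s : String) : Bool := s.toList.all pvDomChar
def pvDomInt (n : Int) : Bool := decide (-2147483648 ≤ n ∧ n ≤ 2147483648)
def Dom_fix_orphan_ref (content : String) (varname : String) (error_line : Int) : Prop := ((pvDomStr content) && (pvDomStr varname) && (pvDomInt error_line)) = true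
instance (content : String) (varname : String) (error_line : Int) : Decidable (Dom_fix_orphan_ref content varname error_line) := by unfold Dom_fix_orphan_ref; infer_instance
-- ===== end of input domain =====

-- B replaces A's two backward short-circuit scans with one forward accumulating pass and
-- rebuilds the output as head + new line + tail instead of list.insert + join
-- (objective: alternative decomposition, same cost).

-- shared helper: content.splitlines(keepends=True); exact on the domain's chars,
-- whose only line breaks are '\n', '\r' and '\r\n'
def pvSplitKeepGo (cur : List Char) : List Char → List (List Char)
  | [] => if cur.isEmpty then [] else [cur.reverse]
  | '\r' :: '\n' :: rest => (cur.reverse ++ ['\r', '\n']) :: pvSplitKeepGo [] rest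
  | '\r' :: rest => (cur.reverse ++ ['\r']) :: pvSplitKeepGo [] rest
  | '\n' :: rest => (cur.reverse ++ ['\n']) :: pvSplitKeepGo [] rest
  | c :: rest => pvSplitKeepGo (c :: cur) rest

def pvSplitKeep (s : List Char) : List (List Char) := pvSplitKeepGo [] s

-- shared helpers: the two membership tests and the inserted declaration line
def pvHasRef (line : List Char) : Bool := PySem.Chars.isIn "useRef(".toList line

def pvHasFallback (line : List Char) : Bool :=
  PySem.Chars.isIn "useState(".toList line || PySem.Chars.isIn "useContext(".toList line

def pvNewLine (indent_str : List Char) (varname : String) : List Char :=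
  indent_str ++ "const ".toList ++ varname.toList
    ++ " = useRef<ReturnType<typeof setTimeout> | null>(null);\n".toList

-- ===== PORT A =====
-- backward break-loops ported as find? over the countdown range (break = first hit);
-- lines[i] is always in range on these ranges, so pyGetD's default is never used
def fix_orphan_ref (content : String) (varname : String) (error_line : Int) : String × Int :=
  let lines := pvSplitKeep content.toList
  let limit : Int := min (error_line - 1) (lines.length : Int)
  -- first break-loop's hit; if none, the second loop's hit; if none, -1
  let insert_after : Int :=
    ((PySem.List.pyRange (limit - 1) (-1) (-1)).find?
        (fun i => pvHasRef (PySem.List.pyGetD lines i []))).getD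
      (((PySem.List.pyRange (limit - 1) (-1) (-1)).find?
          (fun i => pvHasFallback (PySem.List.pyGetD lines i []))).getD (-1))
  if insert_after == -1 then (content, 0)
  else
    let ref_line := PySem.List.pyGetD lines insert_after []
    let indent := ref_line.length - (PySem.Chars.lstrip ref_line).length
    let indent_str := ref_line.take indent
    let new_line := pvNewLine indent_str varname
    let lines2 := PySem.List.insert lines (insert_after + 1) new_line
    (String.ofList (PySem.Chars.join [] lines2), 1)

-- ===== PORT B =====
def fix_orphan_ref_alt (content : String) (varname : String) (error_line : Int) : String × Int :=
  let lines := pvSplitKeep content.toList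
  let limit : Int := min (error_line - 1) (lines.length : Int)
  let st := (PySem.List.pyRange 0 limit 1).foldl
      (fun (st : Int × Int) i =>
        let line := PySem.List.pyGetD lines i []
        (if pvHasRef line then i else st.1, if pvHasFallback line then i else st.2))
      (-1, -1)
  let insert_after : Int := if st.1 ≠ -1 then st.1 else st.2
  if insert_after == -1 then (content, 0)
  else
    let ref_line := PySem.List.pyGetD lines insert_after []
    let indent_str := ref_line.take (ref_line.length - (PySem.Chars.lstrip ref_line).length)
    let new_line := pvNewLine indent_str varname
    let head := PySem.Chars.join [] (PySem.List.slice lines none (some (insert_after + 1)))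
    let tail := PySem.Chars.join [] (PySem.List.slice lines (some (insert_after + 1)) none)
    (String.ofList (head ++ new_line ++ tail), 1)

-- ===== PRECONDITION & SPEC =====
def Spec_fix_orphan_ref (content : String) (varname : String) (error_line : Int) (out : String × Int) : Prop := out = fix_orphan_ref_alt content varname error_line
instance (content : String) (varname : String) (error_line : Int) (out : String × Int) : Decidable (Spec_fix_orphan_ref content varname error_line out) := by unfold Spec_fix_orphan_ref; infer_instance

-- ===== CLAIM (what is proved, stated in full; the proofs are below) =====
def Claim_equal_fix_orphan_ref : Prop := ∀ (content : String) (varname : String) (error_line : Int), Dom_fix_orphan_ref content varname error_line → Spec_fix_orphan_ref content varname error_line (fix_orphan_ref content varname error_line)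

-- ===== LEMMAS AND PROOFS =====

-- a last-hit fold equals a first-hit search over the reversed list
theorem pvFoldlLast (q : Int → Bool) (xs : List Int) (init : Int) :
    xs.foldl (fun acc i => if q i then i else acc) init
      = (xs.reverse.find? q).getD init := by
  induction xs generalizing init with
  | nil => rfl
  | cons x xs ih =>
    simp only [List.foldl_cons, List.reverse_cons, List.find?_append, ih]
    cases h : xs.reverse.find? q with
    | some i => simp
    | none => simp [List.find?]; cases q x <;> simp

-- a fold over a pair state is the pair of the component folds
theorem pvFoldlPair (f g : Int → Int → Int) (xs : List Int) (a b : Int) :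
    xs.foldl (fun (st : Int × Int) i => (f st.1 i, g st.2 i)) (a, b)
      = (xs.foldl f a, xs.foldl g b) := by
  induction xs generalizing a b with
  | nil => rfl
  | cons x xs ih => simp [List.foldl_cons, ih]

-- "".join with empty separator is flatten
theorem pvJoinNil (ls : List (List Char)) : PySem.Chars.join [] ls = ls.flatten := by
  induction ls with
  | nil => rfl
  | cons x ls ih =>
    cases ls with
    | nil => simp [PySem.Chars.join, List.intercalate]
    | cons y ls =>
      simp only [PySem.Chars.join, List.intercalate] at ih ⊢
      rw [List.intersperse_cons₂]
      simp only [List.flatten_cons] at ih ⊢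
      rw [ih]
      simp

-- the two finishing computations agree for an in-range insertion point
theorem pvFinishEq (lines : List (List Char)) (k : Int) (nl : List Char)
    (h0 : 0 ≤ k) (hlt : k < (lines.length : Int)) :
    PySem.Chars.join [] (PySem.List.insert lines (k + 1) nl)
      = PySem.Chars.join [] (PySem.List.slice lines none (some (k + 1))) ++ nl
        ++ PySem.Chars.join [] (PySem.List.slice lines (some (k + 1)) none) := by
  have hp : (k + 1).toNat ≤ lines.length := by omega
  have hk1 : k + 1 = ((k + 1).toNat : Int) := by omega
  rw [hk1, PySem.List.insert_natCast lines (k + 1).toNat nl hp,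
    PySem.List.slice_to_natCast, PySem.List.slice_from_natCast]
  simp [pvJoinNil]

-- the whole computation, generalized over the split lines and the limit
theorem pvMain (content varname : String) (lines : List (List Char)) (limit : Int)
    (hlim : limit ≤ (lines.length : Int)) :
    (let insert_after : Int :=
      ((PySem.List.pyRange (limit - 1) (-1) (-1)).find?
          (fun i => pvHasRef (PySem.List.pyGetD lines i []))).getD
        (((PySem.List.pyRange (limit - 1) (-1) (-1)).find?
            (fun i => pvHasFallback (PySem.List.pyGetD lines i []))).getD (-1))
     if insert_after == -1 then ((content, 0) : String × Int)
     else
       let ref_line := PySem.List.pyGetD lines insert_after []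
       let new_line := pvNewLine (ref_line.take (ref_line.length - (PySem.Chars.lstrip ref_line).length)) varname
       (String.ofList (PySem.Chars.join [] (PySem.List.insert lines (insert_after + 1) new_line)), 1))
    = (let st := (PySem.List.pyRange 0 limit 1).foldl
          (fun (st : Int × Int) i =>
            (if pvHasRef (PySem.List.pyGetD lines i []) then i else st.1,
             if pvHasFallback (PySem.List.pyGetD lines i []) then i else st.2))
          (-1, -1)
       let insert_after : Int := if st.1 ≠ -1 then st.1 else st.2
       if insert_after == -1 then ((content, 0) : String × Int)
       else
         let ref_line := PySem.List.pyGetD lines insert_after []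
         let new_line := pvNewLine (ref_line.take (ref_line.length - (PySem.Chars.lstrip ref_line).length)) varname
         (String.ofList (PySem.Chars.join [] (PySem.List.slice lines none (some (insert_after + 1))) ++ new_line
           ++ PySem.Chars.join [] (PySem.List.slice lines (some (insert_after + 1)) none)), 1)) := by
  have hrev : PySem.List.pyRange (limit - 1) (-1) (-1)
      = (PySem.List.pyRange 0 limit 1).reverse := by
    rw [PySem.List.pyRange_neg_one_eq_reverse]; norm_num
  have hst : (PySem.List.pyRange 0 limit 1).foldl
        (fun (st : Int × Int) i =>
          (if pvHasRef (PySem.List.pyGetD lines i []) then i else st.1,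
           if pvHasFallback (PySem.List.pyGetD lines i []) then i else st.2))
        (-1, -1)
      = (((PySem.List.pyRange 0 limit 1).reverse.find? (fun i => pvHasRef (PySem.List.pyGetD lines i []))).getD (-1),
         ((PySem.List.pyRange 0 limit 1).reverse.find? (fun i => pvHasFallback (PySem.List.pyGetD lines i []))).getD (-1)) := by
    rw [pvFoldlPair (fun a i => if pvHasRef (PySem.List.pyGetD lines i []) then i else a)
      (fun b i => if pvHasFallback (PySem.List.pyGetD lines i []) then i else b)]
    rw [pvFoldlLast, pvFoldlLast]
  simp only [hrev, hst]
  cases h1 : (PySem.List.pyRange 0 limit 1).reverse.find? (fun i => pvHasRef (PySem.List.pyGetD lines i [])) with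
  | some i =>
    have hi : 0 ≤ i ∧ i < limit := by
      have := (PySem.List.mem_pyRange_one).1 (List.mem_reverse.1 (List.mem_of_find?_eq_some h1))
      omega
    have hne : i ≠ -1 := by omega
    have hbeq : (i == -1) = false := by simpa using hne
    simp only [Option.getD_some, if_pos hne, hbeq, Bool.false_eq_true, if_false]
    rw [pvFinishEq lines i _ hi.1 (by omega)]
  | none =>
    simp only [Option.getD_none]
    cases h2 : (PySem.List.pyRange 0 limit 1).reverse.find? (fun i => pvHasFallback (PySem.List.pyGetD lines i [])) with
    | some j =>
      have hj : 0 ≤ j ∧ j < limit := by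
        have := (PySem.List.mem_pyRange_one).1 (List.mem_reverse.1 (List.mem_of_find?_eq_some h2))
        omega
      have hne : j ≠ -1 := by omega
      have hbeq : (j == -1) = false := by simpa using hne
      simp only [Option.getD_some]
      rw [if_neg (by omega : ¬ (-1 : Int) ≠ -1)]
      simp only [hbeq, Bool.false_eq_true, if_false]
      rw [pvFinishEq lines j _ hj.1 (by omega)]
    | none =>
      simp

-- ===== VERDICT (by name: the statement is the Claim_ definition above) =====
theorem fix_orphan_ref_spec : Claim_equal_fix_orphan_ref := by
  intro content varname error_line _
  unfold Spec_fix_orphan_ref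
  have hA : fix_orphan_ref content varname error_line =
      (have insert_after : Int :=
         ((PySem.List.pyRange ((min (error_line - 1) ((pvSplitKeep content.toList).length : Int)) - 1) (-1) (-1)).find?
             (fun i => pvHasRef (PySem.List.pyGetD (pvSplitKeep content.toList) i []))).getD
           (((PySem.List.pyRange ((min (error_line - 1) ((pvSplitKeep content.toList).length : Int)) - 1) (-1) (-1)).find?
               (fun i => pvHasFallback (PySem.List.pyGetD (pvSplitKeep content.toList) i []))).getD (-1))
       if insert_after == -1 then (content, 0)
       else
         have ref_line := PySem.List.pyGetD (pvSplitKeep content.toList) insert_after []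
         have new_line := pvNewLine (ref_line.take (ref_line.length - (PySem.Chars.lstrip ref_line).length)) varname
         (String.ofList (PySem.Chars.join [] (PySem.List.insert (pvSplitKeep content.toList) (insert_after + 1) new_line)), 1)) := rfl
  have hB : fix_orphan_ref_alt content varname error_line =
      (have st := (PySem.List.pyRange 0 (min (error_line - 1) ((pvSplitKeep content.toList).length : Int)) 1).foldl
           (fun (st : Int × Int) i =>
             (if pvHasRef (PySem.List.pyGetD (pvSplitKeep content.toList) i []) then i else st.1,
              if pvHasFallback (PySem.List.pyGetD (pvSplitKeep content.toList) i []) then i else st.2))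
           (-1, -1)
       have insert_after : Int := if st.1 ≠ -1 then st.1 else st.2
       if insert_after == -1 then (content, 0)
       else
         have ref_line := PySem.List.pyGetD (pvSplitKeep content.toList) insert_after []
         have new_line := pvNewLine (ref_line.take (ref_line.length - (PySem.Chars.lstrip ref_line).length)) varname
         (String.ofList (PySem.Chars.join [] (PySem.List.slice (pvSplitKeep content.toList) none (some (insert_after + 1))) ++ new_line
           ++ PySem.Chars.join [] (PySem.List.slice (pvSplitKeep content.toList) (some (insert_after + 1)) none)), 1)) := rfl
  rw [hA, hB]
  exact pvMain content varname (pvSplitKeep content.toList) (min (error_line - 1) ((pvSplitKeep content.toList).length : Int)) (min_le_right _ _)
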